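-- pv_equiv track=rewrite | github.com/falcomza/py-docx | src/pydocx/read.py | _find_paragraph_index
-- ===== SOURCE A (Python) =====
-- from collections.abc import Iterable
--
-- def _find_paragraph_index(full_text: str, position: int, paragraphs: Iterable[str]) -> int:
--     current = 0
--     for idx, para in enumerate(paragraphs):
--         end = current + len(para)
--         if current <= position < end:
--             return idx
--         current = end
--     return -1
-- ===== SOURCE B (Python) =====
-- def _find_paragraph_index(full_text: str, position: int, paragraphs) -> int:
--     # Prefix-sum table of paragraph end offsets; the answer is the number of
--     # end offsets <= position (when position lies inside the text at all).
--     ends = []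
--     total = 0
--     for para in paragraphs:
--         total += len(para)
--         ends.append(total)
--     if 0 <= position < total:
--         return len([e for e in ends if e <= position])
--     return -1
-- ===== Notes on version B (the rewrite author's own statement) =====
-- stated objective: alternative
-- what changed: Replaces the early-return enumerate scan with a materialized prefix-sum table of paragraph end offsets: the index is computed as the count of end offsets <= position, after a single range check against the total length.
import Mathlib
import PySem

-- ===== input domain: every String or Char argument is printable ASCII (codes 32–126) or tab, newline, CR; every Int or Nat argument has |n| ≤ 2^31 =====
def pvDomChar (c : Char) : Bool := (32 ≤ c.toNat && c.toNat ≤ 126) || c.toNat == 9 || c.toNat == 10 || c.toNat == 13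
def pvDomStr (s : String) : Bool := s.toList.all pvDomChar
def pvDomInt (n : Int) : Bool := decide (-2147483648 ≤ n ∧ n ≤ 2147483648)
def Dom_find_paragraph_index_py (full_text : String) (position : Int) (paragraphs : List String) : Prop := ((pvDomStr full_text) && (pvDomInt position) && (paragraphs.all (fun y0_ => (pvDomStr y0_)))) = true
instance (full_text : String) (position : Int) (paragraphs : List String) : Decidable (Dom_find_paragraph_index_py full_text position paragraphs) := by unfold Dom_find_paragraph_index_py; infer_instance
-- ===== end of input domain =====

-- B replaces A's early-return scan with a prefix-sum table of paragraph end offsets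
-- and a count of offsets ≤ position (alternative decomposition, same cost).

-- ===== PORT A =====
-- the enumerate loop of A, with the running offset `current` and index `idx`
def findParaGoA (position : Int) : List String → Int → Int → Int
  | [], _, _ => -1
  | para :: rest, idx, current =>
    let e := current + PySem.Str.len para
    if current ≤ position ∧ position < e then idx
    else findParaGoA position rest (idx + 1) e

def find_paragraph_index_py (full_text : String) (position : Int) (paragraphs : List String) : Int :=
  findParaGoA position paragraphs 0 0

-- ===== PORT B =====
def find_paragraph_index_py_alt (full_text : String) (position : Int) (paragraphs : List String) : Int :=
  -- build ends (list of cumulative end offsets) and total, as Source B's loop does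
  let st := paragraphs.foldl (fun (acc : List Int × Int) para =>
      let t := acc.2 + PySem.Str.len para
      (acc.1 ++ [t], t)) ([], 0)
  if 0 ≤ position ∧ position < st.2 then
    ((st.1.filter (fun e => e ≤ position)).length : Int)
  else -1

-- ===== PRECONDITION & SPEC =====
def Spec_find_paragraph_index_py (full_text : String) (position : Int) (paragraphs : List String) (out : Int) : Prop := out = find_paragraph_index_py_alt full_text position paragraphs
instance (full_text : String) (position : Int) (paragraphs : List String) (out : Int) : Decidable (Spec_find_paragraph_index_py full_text position paragraphs out) := by unfold Spec_find_paragraph_index_py; infer_instance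

-- ===== CLAIM (what is proved, stated in full; the proofs are below) =====
def Claim_equal_find_paragraph_index_py : Prop := ∀ (full_text : String) (position : Int) (paragraphs : List String), Dom_find_paragraph_index_py full_text position paragraphs → Spec_find_paragraph_index_py full_text position paragraphs (find_paragraph_index_py full_text position paragraphs)

-- ===== LEMMAS AND PROOFS =====

-- cons-style form of the prefix table Source B builds by appending
def pvEnds : List String → Int → List Int
  | [], _ => []
  | p :: ps, c => (c + PySem.Str.len p) :: pvEnds ps (c + PySem.Str.len p)

def pvSumLens (ps : List String) : Int := (ps.map PySem.Str.len).sum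

lemma pvLen_nonneg (s : String) : 0 ≤ PySem.Str.len s := by
  simp [PySem.Str.len_eq]

lemma pvSumLens_nonneg (ps : List String) : 0 ≤ pvSumLens ps := by
  induction ps with
  | nil => simp [pvSumLens]
  | cons p ps ih =>
      have := pvLen_nonneg p
      simp only [pvSumLens, List.map_cons, List.sum_cons] at *
      omega

lemma pvEnds_lb (ps : List String) (c : Int) : ∀ e ∈ pvEnds ps c, c ≤ e := by
  induction ps generalizing c with
  | nil => simp [pvEnds]
  | cons p ps ih =>
      intro e he
      have hL := pvLen_nonneg p
      simp only [pvEnds, List.mem_cons] at he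
      rcases he with h | h
      · omega
      · have := ih (c + PySem.Str.len p) e h
        omega

lemma pvSumLens_cons (p : String) (ps : List String) :
    pvSumLens (p :: ps) = PySem.Str.len p + pvSumLens ps := by
  simp [pvSumLens]

lemma pvFoldl_ends (ps : List String) (acc : List Int) (c : Int) :
    ps.foldl (fun (acc : List Int × Int) para =>
      let t := acc.2 + PySem.Str.len para
      (acc.1 ++ [t], t)) (acc, c)
    = (acc ++ pvEnds ps c, c + pvSumLens ps) := by
  induction ps generalizing acc c with
  | nil => simp [pvEnds, pvSumLens]
  | cons p ps ih =>
      simp only [List.foldl_cons, ih, pvEnds, pvSumLens_cons, Prod.mk.injEq]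
      constructor
      · simp
      · ring

lemma pvGoA_eq (position : Int) (ps : List String) (idx current : Int) :
    findParaGoA position ps idx current =
      if current ≤ position ∧ position < current + pvSumLens ps
      then idx + (((pvEnds ps current).filter (fun e => e ≤ position)).length : Int)
      else -1 := by
  induction ps generalizing idx current with
  | nil =>
      simp only [findParaGoA, pvSumLens, List.map_nil, List.sum_nil]
      rw [if_neg (by omega)]
  | cons p ps ih =>
      have hL := pvLen_nonneg p
      have hS := pvSumLens_nonneg ps
      rw [pvSumLens_cons]
      simp only [findParaGoA]
      by_cases h : current ≤ position ∧ position < current + PySem.Str.len p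
      · rw [if_pos h]
        have hzero : ((pvEnds (p :: ps) current).filter (fun e => e ≤ position)) = [] := by
          rw [List.filter_eq_nil_iff]
          intro e he
          have hlb : current + PySem.Str.len p ≤ e := by
            simp only [pvEnds, List.mem_cons] at he
            rcases he with h' | h'
            · omega
            · exact pvEnds_lb ps _ e h'
          simp only [decide_eq_true_eq]
          omega
        rw [if_pos (by omega), hzero]
        simp
      · rw [if_neg h]
        rw [ih]
        by_cases h2 : current + PySem.Str.len p ≤ position
        · -- head end offset ≤ position: head counts once, conditions align
          have he : (decide ((current + PySem.Str.len p) ≤ position)) = true := by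
            simp only [decide_eq_true_eq]; omega
          by_cases h3 : position < current + PySem.Str.len p + pvSumLens ps
          · rw [if_pos ⟨h2, h3⟩, if_pos (by omega)]
            simp only [pvEnds, List.filter_cons, he, if_true, List.length_cons]
            push_cast
            ring
          · rw [if_neg (by omega), if_neg (by omega)]
        · -- position < current: both sides return -1
          rw [if_neg (by omega), if_neg (by omega)]

-- ===== VERDICT (by name: the statement is the Claim_ definition above) =====
theorem find_paragraph_index_py_spec : Claim_equal_find_paragraph_index_py := by
  intro full_text position paragraphs _
  show find_paragraph_index_py full_text position paragraphs
      = find_paragraph_index_py_alt full_text position paragraphs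
  simp only [find_paragraph_index_py, find_paragraph_index_py_alt, pvFoldl_ends, pvGoA_eq,
    List.nil_append, zero_add]
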